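-- pv_equiv track=rewrite | github.com/sen-uni-kn/SDN-SafeCheck | netkat_eq.py | label_atoms
-- ===== SOURCE A (Python) =====
-- def label_atoms(report):
--     label = {}
--     counter = 0
--     for i, e in report.items():
--         atoms = e.split('.')
--         for j, a in enumerate(atoms):
--             a = a.lstrip().rstrip()
--             if not a in label:
--                 label[a] = "p{}".format(counter)
--                 counter += 1
--             atoms[j] = label[a]
--         report[i] = '.'.join(atoms)
--
--     return report
-- ===== SOURCE B (Python) =====
-- def label_atoms(report):
--     label = {}
--     for e in report.values():
--         for a in e.split('.'):
--             label.setdefault(a.strip(), "p{}".format(len(label)))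
--     for i, e in report.items():
--         report[i] = '.'.join(label[a.strip()] for a in e.split('.'))
--     return report
-- ===== Notes on version B (the rewrite author's own statement) =====
-- stated objective: alternative
-- what changed: A fuses table-building and rewriting in one pass with an explicit counter; B first builds the complete canonical label table with setdefault keyed by len(label) in a separate pass over all values, then rewrites every entry by pure lookup in the finished table.
import Mathlib
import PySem

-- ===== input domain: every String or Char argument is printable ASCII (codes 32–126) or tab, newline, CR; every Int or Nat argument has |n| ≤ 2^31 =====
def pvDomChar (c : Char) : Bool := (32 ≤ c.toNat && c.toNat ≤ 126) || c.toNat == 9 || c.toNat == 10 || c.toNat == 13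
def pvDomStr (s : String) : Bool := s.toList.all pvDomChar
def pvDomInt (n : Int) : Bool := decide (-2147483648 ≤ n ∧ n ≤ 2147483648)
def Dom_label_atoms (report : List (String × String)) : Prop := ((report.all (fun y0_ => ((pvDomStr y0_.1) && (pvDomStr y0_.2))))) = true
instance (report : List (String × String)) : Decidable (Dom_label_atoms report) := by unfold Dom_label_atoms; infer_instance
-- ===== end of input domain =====

-- B separates table-building from rewriting (two passes over the dict) instead of A's fused single
-- pass with an explicit counter; same cost.  A mutates its dict argument's values in place (so does
-- B); the equivalence proved here is about the return value.

-- shared transliteration of e.split('.') ('.' ≠ "", so split? is always some)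
def pSplit (e : String) : List String := (PySem.Str.split? e ".").getD []

-- ===== PORT A =====
-- a.lstrip().rstrip()
def aStrip (a : String) : String := PySem.Str.rstrip (PySem.Str.lstrip a)

-- the inner 'for j, a in enumerate(atoms)' loop: (relabelled atoms, label, counter)
def aInner : PySem.Dict String String → Int → List String →
    List String × PySem.Dict String String × Int
  | label, counter, [] => ([], label, counter)
  | label, counter, a :: rest =>
    let a' := aStrip a
    let p :=
      if label.contains a' then (label, counter)
      else (label.insert a' ("p" ++ PySem.Int.toStr counter), counter + 1)
    let v := p.1.getD a' ""
    let r := aInner p.1 p.2 rest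
    (v :: r.1, r.2.1, r.2.2)

-- the outer 'for i, e in report.items()' loop (report[i] = … rewrites the current entry's value)
def aGo : List (String × String) → PySem.Dict String String → Int → List (String × String)
  | [], _, _ => []
  | (i, e) :: rest, label, counter =>
    let r := aInner label counter (pSplit e)
    (i, PySem.Str.join "." r.1) :: aGo rest r.2.1 r.2.2

def label_atoms (report : List (String × String)) : List (String × String) :=
  aGo (PySem.Dict.ofList report).items PySem.Dict.empty 0

-- ===== PORT B =====
-- label.setdefault(a.strip(), "p{}".format(len(label)))
def bStep (l : PySem.Dict String String) (a : String) : PySem.Dict String String :=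
  l.setdefault (PySem.Str.strip a) ("p" ++ PySem.Int.toStr (l.size : Int))

def label_atoms_alt (report : List (String × String)) : List (String × String) :=
  let d := PySem.Dict.ofList report
  let label := d.items.foldl (fun l p => (pSplit p.2).foldl bStep l) PySem.Dict.empty
  d.items.map (fun p =>
    (p.1, PySem.Str.join "." ((pSplit p.2).map (fun a => label.getD (PySem.Str.strip a) ""))))

-- ===== PRECONDITION & SPEC =====
def Spec_label_atoms (report : List (String × String)) (out : List (String × String)) : Prop := out = label_atoms_alt report
instance (report : List (String × String)) (out : List (String × String)) : Decidable (Spec_label_atoms report out) := by unfold Spec_label_atoms; infer_instance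

-- ===== CLAIM (what is proved, stated in full; the proofs are below) =====
def Claim_equal_label_atoms : Prop := ∀ (report : List (String × String)), Dom_label_atoms report → Spec_label_atoms report (label_atoms report)

-- ===== LEMMAS AND PROOFS =====

-- a.strip() = a.lstrip().rstrip()
theorem strip_eq_aStrip (a : String) : PySem.Str.strip a = aStrip a := by
  have h1 : (PySem.Str.strip a).toList = (aStrip a).toList := by
    simp [PySem.Str.toList_strip, PySem.Str.toList_rstrip, PySem.Str.toList_lstrip, aStrip,
      PySem.Chars.strip]
  exact String.toList_inj.mp h1

-- the common table-building step, on an ALREADY-STRIPPED atom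
def buildStep (l : PySem.Dict String String) (a' : String) : PySem.Dict String String :=
  if l.contains a' then l else l.insert a' ("p" ++ PySem.Int.toStr (l.size : Int))

theorem bStep_eq (l : PySem.Dict String String) (a : String) :
    bStep l a = buildStep l (aStrip a) := by
  rw [bStep, buildStep, ← strip_eq_aStrip]
  by_cases h : l.contains (PySem.Str.strip a) = true
  · rw [PySem.Dict.setdefault_of_contains _ _ h, if_pos h]
  · rw [PySem.Dict.setdefault_of_not_contains _ _ (by simpa using h), if_neg h]

theorem contains_buildStep_self (l : PySem.Dict String String) (a : String) :
    (buildStep l a).contains a = true := by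
  rw [buildStep]; split_ifs with h
  · exact h
  · exact PySem.Dict.contains_insert_self _ _ _

theorem contains_buildStep_mono (l : PySem.Dict String String) (a k : String)
    (h : l.contains k = true) : (buildStep l a).contains k = true := by
  rw [buildStep]; split_ifs with h'
  · exact h
  · simp [PySem.Dict.contains_insert, h]

def build (l : PySem.Dict String String) (xs : List String) : PySem.Dict String String :=
  xs.foldl buildStep l

def atomsOf (items : List (String × String)) : List String :=
  items.flatMap (fun p => (pSplit p.2).map aStrip)

theorem contains_build_mono (xs : List String) (l : PySem.Dict String String) (k : String)
    (h : l.contains k = true) : (build l xs).contains k = true := by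
  induction xs generalizing l with
  | nil => exact h
  | cons x xs ih => exact ih _ (contains_buildStep_mono _ _ _ h)

theorem contains_build_of_mem (xs : List String) (l : PySem.Dict String String) (k : String)
    (h : k ∈ xs) : (build l xs).contains k = true := by
  induction xs generalizing l with
  | nil => cases h
  | cons x xs ih =>
    rcases List.mem_cons.mp h with rfl | h'
    · exact contains_build_mono xs (buildStep l k) k (contains_buildStep_self l k)
    · exact ih _ h'

theorem getD_buildStep_stable (l : PySem.Dict String String) (a k : String)
    (h : l.contains k = true) (v : String) : (buildStep l a).getD k v = l.getD k v := by
  rw [buildStep]; split_ifs with h'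
  · rfl
  · rw [PySem.Dict.getD_insert]
    split_ifs with hk
    · subst hk; rw [h] at h'; exact absurd rfl h'
    · rfl

-- setdefault never overwrites: a present key's binding is stable under further building
theorem getD_build_stable (xs : List String) (l : PySem.Dict String String) (k : String)
    (h : l.contains k = true) (v : String) : (build l xs).getD k v = l.getD k v := by
  induction xs generalizing l with
  | nil => rfl
  | cons x xs ih =>
    rw [build, List.foldl_cons]
    rw [show List.foldl buildStep (buildStep l x) xs = build (buildStep l x) xs from rfl]
    rw [ih _ (contains_buildStep_mono _ _ _ h), getD_buildStep_stable _ _ _ h]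

theorem build_append (l : PySem.Dict String String) (xs ys : List String) :
    build l (xs ++ ys) = build (build l xs) ys := by
  simp [build, List.foldl_append]

-- A's inner loop = relabel every atom through the table built from ALL of this entry's atoms
theorem aInner_eq (atoms : List String) (l : PySem.Dict String String) (c : Int)
    (h : c = (l.size : Int)) :
    aInner l c atoms =
      ((atoms.map (fun a => (build l (atoms.map aStrip)).getD (aStrip a) "")),
       build l (atoms.map aStrip),
       ((build l (atoms.map aStrip)).size : Int)) := by
  induction atoms generalizing l c with
  | nil => simp [aInner, build, h]
  | cons a rest ih =>
    have hstep : (if l.contains (aStrip a) then (l, c)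
        else (l.insert (aStrip a) ("p" ++ PySem.Int.toStr c), c + 1))
        = (buildStep l (aStrip a), ((buildStep l (aStrip a)).size : Int)) := by
      subst h
      rw [buildStep]
      split_ifs with hc
      · rfl
      · simp [PySem.Dict.size_insert, hc]
    simp only [aInner, hstep, List.map_cons]
    rw [ih (buildStep l (aStrip a)) _ rfl]
    simp only [Prod.mk.injEq, List.cons.injEq]
    exact ⟨⟨(getD_build_stable _ _ _ (contains_buildStep_self l (aStrip a)) "").symm, rfl⟩, rfl, rfl⟩

-- A's outer loop = relabel every entry through the table built from ALL atoms of the report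
theorem aGo_eq (items : List (String × String)) (l : PySem.Dict String String) (c : Int)
    (h : c = (l.size : Int)) :
    aGo items l c =
      items.map (fun p =>
        (p.1, PySem.Str.join "." ((pSplit p.2).map
          (fun a => (build l (atomsOf items)).getD (aStrip a) "")))) := by
  induction items generalizing l c with
  | nil => rfl
  | cons pe rest ih =>
    obtain ⟨i, e⟩ := pe
    have hT : build l (atomsOf ((i, e) :: rest))
        = build (build l ((pSplit e).map aStrip)) (atomsOf rest) := by
      rw [atomsOf, List.flatMap_cons, build_append]; rfl
    simp only [aGo, aInner_eq _ _ _ h, List.map_cons, List.cons.injEq]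
    refine ⟨?_, ?_⟩
    · congr 1
      congr 1
      apply List.map_congr_left
      intro a ha
      rw [hT, getD_build_stable _ _ _ (contains_build_of_mem _ _ _ (List.mem_map_of_mem ha))]
    · rw [ih _ _ rfl, hT]

theorem foldl_foldl_flatMap (items : List (String × String)) (l : PySem.Dict String String) :
    items.foldl (fun l p => ((pSplit p.2).map aStrip).foldl buildStep l) l
      = build l (atomsOf items) := by
  induction items generalizing l with
  | nil => rfl
  | cons pe rest ih =>
    rw [List.foldl_cons, ih,
      show atomsOf (pe :: rest) = (pSplit pe.2).map aStrip ++ atomsOf rest from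
        List.flatMap_cons .., build_append]
    rfl

-- B's first pass builds exactly that table
theorem bTable_eq (items : List (String × String)) :
    items.foldl (fun l p => (pSplit p.2).foldl bStep l) PySem.Dict.empty
      = build PySem.Dict.empty (atomsOf items) := by
  have hf : (fun (l : PySem.Dict String String) (p : String × String) => (pSplit p.2).foldl bStep l)
      = (fun l p => ((pSplit p.2).map aStrip).foldl buildStep l) := by
    funext l p
    rw [List.foldl_map]
    have : bStep = fun (l' : PySem.Dict String String) a => buildStep l' (aStrip a) := by
      funext l' a; exact bStep_eq l' a
    rw [this]
  rw [hf, foldl_foldl_flatMap]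

-- ===== VERDICT (by name: the statement is the Claim_ definition above) =====
theorem label_atoms_spec : Claim_equal_label_atoms := by
  intro report _
  unfold Spec_label_atoms label_atoms label_atoms_alt
  rw [aGo_eq _ _ _ (by simp)]
  simp only [bTable_eq, strip_eq_aStrip]
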